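-- pv_equiv track=rewrite | github.com/Deaponn/asd | offline_2/zad2.py | snow
-- ===== SOURCE A (Python) =====
-- def insertion_sort(T, start, end):
--     n = end - start + 1
--     output = [0] * n
--     for idx in range(n):
--         number = T[start + idx]
--         for insert in range(n - 1, -1, -1):
--             if number > output[insert - 1]:
--                 output[insert] = output[insert - 1]
--             else:
--                 output[insert] = number
--                 break
--             if insert == 0:
--                 output[0] = number
--     return output
--
-- def merge(T, S):
--     n = len(T)
--     m = len(S)
--     start_1st = 0
--     start_2nd = 0
--     output = [0] * (n + m)
--     current_idx = 0
--     while start_1st < n and start_2nd < m: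
--         if T[start_1st] > S[start_2nd]:
--             output[current_idx] = T[start_1st]
--             start_1st += 1
--         else:
--             output[current_idx] = S[start_2nd]
--             start_2nd += 1
--         current_idx += 1
--     while start_1st < n:
--         output[current_idx] = T[start_1st]
--         start_1st += 1
--         current_idx += 1
--     while start_2nd < m:
--         output[current_idx] = S[start_2nd]
--         start_2nd += 1
--         current_idx += 1
--     return output
--
-- def merge_sort(T, start, end):
--     n = end - start
--     # standard merge_sort:
--     # if n <= 0:
--     #     return [T[start]]
--
--     # below code optimizes from runtime 2.6s down to 2.3s (on my PC)
--     # if n <= 0: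
--     #     return [T[start]]
--     # if n == 1:
--     #     if T[start] >= T[end]:
--     #         return [T[start], T[end]]
--     #     else:
--     #         return [T[end], T[start]]
--
--     # insertion sort for short arrays:
--     # for small n this has no effect to the runtime
--     if n < 41:
--         T = insertion_sort(T, start, end)
--         return T
--     middle = start + n // 2
--     left = merge_sort(T, start, middle)
--     right = merge_sort(T, middle + 1, end)
--     return merge(left, right)
--
-- def snow( S ):
--     output = 0
--     day = 0
--     S = merge_sort(S, 0, len(S) - 1)
--     # quick_sort(S, 0, len(S))
--     while S[day] > day:
--         output += S[day] - day
--         day += 1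
--     return output
-- ===== SOURCE B (Python) =====
-- def snow( S ):
--     # counting algorithm, no comparison sort: bucket-count the positive values
--     # clipped at n = len(S) (the part of a value above n always contributes, it is
--     # summed separately in 'excess'), then walk the buckets from the highest value
--     # down, assigning days greedily.
--     n = len(S)
--     cnt = [0] * (n + 1)
--     excess = 0
--     for x in S:
--         if x > 0:
--             v = x if x < n else n
--             cnt[v] += 1
--             excess += x - v
--     output = 0
--     day = 0
--     for v in range(n, 0, -1):
--         for _ in range(cnt[v]):
--             if v <= day:
--                 return output + excess
--             output += v - day
--             day += 1
--     return output + excess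
-- ===== Notes on version B (the rewrite author's own statement) =====
-- stated objective: faster
-- what changed: Replaced the comparison merge sort + scan by a sort-free counting algorithm: positive values are bucket-counted clipped at n (the clipped-off part is summed separately as 'excess', which is exact because every value >= n is necessarily taken), then the buckets are walked from the highest value down assigning days greedily.
import Mathlib
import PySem

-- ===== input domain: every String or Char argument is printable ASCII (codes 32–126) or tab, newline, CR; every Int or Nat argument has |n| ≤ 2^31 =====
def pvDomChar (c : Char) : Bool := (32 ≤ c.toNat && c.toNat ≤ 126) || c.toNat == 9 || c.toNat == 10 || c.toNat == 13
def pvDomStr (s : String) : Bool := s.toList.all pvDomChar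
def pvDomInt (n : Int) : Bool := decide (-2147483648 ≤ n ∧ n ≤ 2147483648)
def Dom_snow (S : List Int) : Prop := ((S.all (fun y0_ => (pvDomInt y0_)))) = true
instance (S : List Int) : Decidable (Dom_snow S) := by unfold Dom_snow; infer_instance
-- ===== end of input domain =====

-- B replaces the comparison merge sort + scan by a sort-free counting algorithm
-- (bucket counts of the positive values clipped at n, walked from the top);
-- objective: faster (asymptotically O(n) instead of O(n log n)).

-- ===== PORT A =====

-- inner 'for insert in range(n-1, -1, -1)' loop of insertion_sort (with its break
-- and its 'if insert == 0' patch); the argument is the current value of 'insert'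
def pvInsLoop (number : Int) : Nat → List Int → List Int
  | 0, output =>
      -- insert = 0: output[insert - 1] is output[-1] (Python wraparound)
      if number > PySem.List.pyGetD output (-1) 0 then
        -- shift, no break, then the 'if insert == 0' write
        PySem.List.pySetD (PySem.List.pySetD output 0 (PySem.List.pyGetD output (-1) 0)) 0 number
      else
        PySem.List.pySetD output 0 number  -- break
  | insert + 1, output =>
      if number > PySem.List.pyGetD output ((insert : Int) + 1 - 1) 0 then
        pvInsLoop number insert
          (PySem.List.pySetD output ((insert : Int) + 1) (PySem.List.pyGetD output ((insert : Int) + 1 - 1) 0))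
      else
        PySem.List.pySetD output ((insert : Int) + 1) number  -- break

def pvInsertionSort (T : List Int) (start end_ : Int) : List Int :=
  let n : Int := end_ - start + 1
  let output : List Int := List.replicate n.toNat 0
  (List.range n.toNat).foldl (fun (output : List Int) (idx : Nat) =>
    let number := PySem.List.pyGetD T (start + (idx : Int)) 0
    pvInsLoop number (n.toNat - 1) output) output

-- first 'while start_1st < n and start_2nd < m' loop of merge
def pvMergeLoop1 (T S : List Int) (s1 s2 cur : Nat) (output : List Int) :
    Nat × Nat × Nat × List Int :=
  if s1 < T.length ∧ s2 < S.length then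
    if PySem.List.pyGetD T (s1 : Int) 0 > PySem.List.pyGetD S (s2 : Int) 0 then
      pvMergeLoop1 T S (s1 + 1) s2 (cur + 1)
        (PySem.List.pySetD output (cur : Int) (PySem.List.pyGetD T (s1 : Int) 0))
    else
      pvMergeLoop1 T S s1 (s2 + 1) (cur + 1)
        (PySem.List.pySetD output (cur : Int) (PySem.List.pyGetD S (s2 : Int) 0))
  else (s1, s2, cur, output)
termination_by (T.length - s1) + (S.length - s2)
decreasing_by all_goals omega

-- second 'while start_1st < n' loop of merge
def pvMergeLoop2 (T : List Int) (s1 cur : Nat) (output : List Int) : Nat × Nat × List Int :=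
  if s1 < T.length then
    pvMergeLoop2 T (s1 + 1) (cur + 1) (PySem.List.pySetD output (cur : Int) (PySem.List.pyGetD T (s1 : Int) 0))
  else (s1, cur, output)
termination_by T.length - s1
decreasing_by omega

-- third 'while start_2nd < m' loop of merge
def pvMergeLoop3 (S : List Int) (s2 cur : Nat) (output : List Int) : Nat × Nat × List Int :=
  if s2 < S.length then
    pvMergeLoop3 S (s2 + 1) (cur + 1) (PySem.List.pySetD output (cur : Int) (PySem.List.pyGetD S (s2 : Int) 0))
  else (s2, cur, output)
termination_by S.length - s2
decreasing_by omega

def pvMerge (T S : List Int) : List Int :=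
  let n := T.length
  let m := S.length
  let output : List Int := List.replicate (n + m) 0
  let r1 := pvMergeLoop1 T S 0 0 0 output
  let r2 := pvMergeLoop2 T r1.1 r1.2.2.1 r1.2.2.2
  let r3 := pvMergeLoop3 S r1.2.1 r2.2.1 r2.2.2
  r3.2.2

def pvMergeSort (T : List Int) (start end_ : Int) : List Int :=
  let n : Int := end_ - start
  if n < 41 then pvInsertionSort T start end_
  else
    let middle := start + PySem.Int.floordiv n 2
    pvMerge (pvMergeSort T start middle) (pvMergeSort T (middle + 1) end_)
termination_by (end_ - start).toNat
decreasing_by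
  all_goals
    simp only [PySem.Int.floordiv, Int.fdiv_eq_ediv_of_nonneg _ (by norm_num : (0:Int) ≤ 2)]
    omega

-- 'while S[day] > day' loop of snow; Python raises IndexError once day reaches
-- len(S) (the out-of-range case is excluded by Pre_snow)
def pvSnowLoopA (S : List Int) (output : Int) (day : Nat) : Int :=
  if day < S.length then
    if PySem.List.pyGetD S (day : Int) 0 > (day : Int) then
      pvSnowLoopA S (output + PySem.List.pyGetD S (day : Int) 0 - (day : Int)) (day + 1)
    else output
  else output
termination_by S.length - day
decreasing_by omega

def snow (S : List Int) : Int :=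
  pvSnowLoopA (pvMergeSort S 0 ((S.length : Int) - 1)) 0 0

-- ===== PORT B =====

-- counting pass of Source B: bucket counts of the positive values clipped at n,
-- plus the total clipped-off excess
def pvCountB (S : List Int) (n : Nat) : List Int × Int :=
  S.foldl (fun (st : List Int × Int) x =>
    if x > 0 then
      let v : Int := if x < (n : Int) then x else (n : Int)
      (PySem.List.pySetD st.1 v (PySem.List.pyGetD st.1 v 0 + 1), st.2 + (x - v))
    else st) (List.replicate (n + 1) 0, 0)

-- inner 'for _ in range(cnt[v])' loop of Source B; Sum.inr = the early 'return'
def pvInnerB (v : Int) : Nat → Int → Int → (Int × Int) ⊕ Int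
  | 0, output, day => Sum.inl (output, day)
  | c + 1, output, day =>
      if v ≤ day then Sum.inr output
      else pvInnerB v c (output + v - day) (day + 1)

-- outer 'for v in range(n, 0, -1)' loop of Source B; the fuel argument is v
def pvOuterB (cnt : List Int) (excess : Int) : Nat → Int → Int → Int
  | 0, output, _ => output + excess
  | v + 1, output, day =>
      match pvInnerB ((v : Int) + 1) (PySem.List.pyGetD cnt ((v : Int) + 1) 0).toNat output day with
      | Sum.inl (o, d) => pvOuterB cnt excess v o d
      | Sum.inr o => o + excess

def snow_alt (S : List Int) : Int :=
  let n := S.length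
  let ce := pvCountB S n
  pvOuterB ce.1 ce.2 n 0 0

-- ===== PRECONDITION & SPEC =====
-- Pre_ excludes exactly the inputs on which A's while loop runs past the end of the
-- sorted list (every sorted value exceeds its index, including the empty list):
-- there the Python A raises IndexError.
def Pre_snow (S : List Int) : Prop :=
  ∃ i < S.length, S.countP (fun x => decide ((i : Int) < x)) ≤ i
instance (S : List Int) : Decidable (Pre_snow S) := by unfold Pre_snow; infer_instance

def pvWitness_snow : List Int := [3, 1, 0]

def Spec_snow (S : List Int) (out : Int) : Prop := out = snow_alt S
instance (S : List Int) (out : Int) : Decidable (Spec_snow S out) := by unfold Spec_snow; infer_instance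

-- ===== CLAIM (what is proved, stated in full; the proofs are below) =====
def Claim_equal_snow : Prop := ∀ (S : List Int), Dom_snow S → Pre_snow S → Spec_snow S (snow S)

-- ===== LEMMAS AND PROOFS =====

-- functional two-list merge (picks the larger head, ties go to the second list),
-- used to characterise pvMerge
def pvMrg : List Int → List Int → List Int
  | [], ys => ys
  | x :: xs, [] => x :: xs
  | x :: xs, y :: ys => if x > y then x :: pvMrg xs (y :: ys) else y :: pvMrg (x :: xs) ys

-- invariant tying a (possibly partially) sorted buffer O to the multiset M it came
-- from: a descending strictly-positive prefix P that is a permutation of M's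
-- positive elements, followed by junk that is all ≤ 0 (the zero-initialised
-- insertion sort of A loses track of non-positive values, but only of those)
def GoodFor (M O : List Int) : Prop :=
  ∃ P J, O = P ++ J ∧ P.Pairwise (· ≥ ·) ∧ (∀ x ∈ P, 0 < x) ∧ (∀ x ∈ J, x ≤ 0) ∧
    P.Perm (M.filter (fun x => decide (0 < x))) ∧ O.length = M.length

lemma pvGetD_eq (l : List Int) (j : Nat) (h : j < l.length) : l.getD j 0 = l[j] :=
  List.getD_eq_getElem l 0 h

lemma pvGetD_set_ne (l : List Int) (i j : Nat) (v : Int) (h : i ≠ j) :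
    (l.set i v).getD j 0 = l.getD j 0 := by
  simp [List.getD_eq_getElem?_getD, List.getElem?_set_ne h]

lemma pvDrop_set_self (l : List Int) (j : Nat) (v : Int) (h : j < l.length) :
    (l.set j v).drop j = v :: l.drop (j + 1) := by
  rw [List.set_eq_take_cons_drop v h]
  exact List.drop_left' (by simp [List.length_take]; omega)

lemma pvInsLoop_eq (m : Int) : ∀ (k : Nat) (s : Nat) (O : List Int), k < O.length → s ≤ k →
    (s = 0 ∨ (1 ≤ s ∧ m ≤ O.getD (s - 1) 0)) →
    (∀ i, s < i → i ≤ k → O.getD (i - 1) 0 < m) →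
    pvInsLoop m k O = O.take s ++ [m] ++ (O.drop s).take (k - s) ++ O.drop (k + 1) := by
  intro k
  induction k with
  | zero =>
    intro s O hk hs hstop hshift
    have hs0 : s = 0 := Nat.le_zero.mp hs
    subst hs0
    cases O with
    | nil => simp at hk
    | cons a t =>
      simp only [pvInsLoop]
      split_ifs <;>
        simp [PySem.List.pySetD_of_nonneg]
  | succ k ih =>
    intro s O hk hs hstop hshift
    have hgd : PySem.List.pyGetD O ((k : Int) + 1 - 1) 0 = O.getD k 0 := by
      have hcast1 : ((k : Int) + 1 - 1) = ((k : Nat) : Int) := by ring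
      rw [hcast1, PySem.List.pyGetD_natCast]
    have hcast2 : ((k : Int) + 1) = ((k + 1 : Nat) : Int) := by push_cast; ring
    rcases Nat.eq_or_lt_of_le hs with hsk | hsk
    · -- s = k + 1: the loop stops at once
      rcases hstop with h0 | ⟨h1, hle⟩
      · omega
      have hcond : ¬ m > O.getD k 0 := by
        have hs1 : s - 1 = k := by omega
        rw [hs1] at hle; omega
      simp only [pvInsLoop]
      rw [hgd, if_neg hcond, hcast2, PySem.List.pySetD_natCast]
      rw [List.set_eq_take_cons_drop m hk]
      rw [hsk]
      simp
    · -- s ≤ k: shift O[k] to O[k+1] and recurse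
      have hsk' : s ≤ k := by omega
      have hlt : O.getD k 0 < m := by
        have := hshift (k + 1) (by omega) le_rfl
        simpa using this
      simp only [pvInsLoop]
      rw [hgd, if_pos hlt, hcast2, PySem.List.pySetD_natCast]
      rw [ih s (O.set (k + 1) (O.getD k 0)) (by simp; omega) hsk'
        (by
          rcases hstop with h0 | ⟨h1, hle⟩
          · exact Or.inl h0
          · exact Or.inr ⟨h1, by rw [pvGetD_set_ne _ _ _ _ (by omega)]; exact hle⟩)
        (by
          intro i hi1 hi2
          rw [pvGetD_set_ne _ _ _ _ (by omega)]
          exact hshift i hi1 (by omega))]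
      have e1 : (O.set (k + 1) (O.getD k 0)).take s = O.take s :=
        List.take_set_of_le (by omega)
      have e2 : ((O.set (k + 1) (O.getD k 0)).drop s).take (k - s) = (O.drop s).take (k - s) := by
        rw [List.drop_set, if_neg (by omega)]
        exact List.take_set_of_le (by omega)
      have e3 : (O.set (k + 1) (O.getD k 0)).drop (k + 1) = O.getD k 0 :: O.drop (k + 2) :=
        pvDrop_set_self O (k + 1) _ hk
      have e4 : (O.drop s).take (k + 1 - s) = (O.drop s).take (k - s) ++ [O.getD k 0] := by
        have hks : k + 1 - s = (k - s) + 1 := by omega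
        rw [hks, List.take_add_one, List.getElem?_drop]
        have hsks : s + (k - s) = k := by omega
        rw [hsks, List.getElem?_eq_getElem (by omega)]
        rw [pvGetD_eq O k (by omega)]
        rfl
      rw [e1, e2, e3, e4]
      simp

lemma pvGetD_append_left (P J : List Int) (j : Nat) (h : j < P.length) :
    (P ++ J).getD j 0 = P.getD j 0 := by
  simp [List.getD_eq_getElem?_getD, List.getElem?_append_left h]

lemma pvGetD_append_right (P J : List Int) (j : Nat) (h : P.length ≤ j) :
    (P ++ J).getD j 0 = J.getD (j - P.length) 0 := by
  simp [List.getD_eq_getElem?_getD, List.getElem?_append_right h]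

lemma pvGetD_mem (l : List Int) (j : Nat) (h : j < l.length) : l.getD j 0 ∈ l := by
  rw [pvGetD_eq l j h]; exact List.getElem_mem h

lemma pvGetD_take (l : List Int) (k j : Nat) (h : j < k) :
    (l.take k).getD j 0 = l.getD j 0 := by
  simp [List.getD_eq_getElem?_getD, List.getElem?_take, h]

lemma pvGetD_reverse (l : List Int) (j : Nat) (h : j < l.length) :
    l.reverse.getD j 0 = l.getD (l.length - 1 - j) 0 := by
  simp [List.getD_eq_getElem?_getD, List.getElem?_reverse h]

lemma pvPairwise_getD (l : List Int) (hp : l.Pairwise (· ≥ ·)) (i j : Nat) (hij : i ≤ j)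
    (hj : j < l.length) : l.getD j 0 ≤ l.getD i 0 := by
  rcases Nat.eq_or_lt_of_le hij with rfl | hlt
  · exact le_refl _
  · rw [pvGetD_eq _ _ hj, pvGetD_eq _ _ (lt_of_le_of_lt hij hj)]
    exact List.pairwise_iff_getElem.mp hp i j _ _ hlt

lemma pvTW_true (q : Int → Bool) : ∀ (l : List Int) (j : Nat),
    j < (l.takeWhile q).length → q (l.getD j 0) = true := by
  intro l
  induction l with
  | nil => simp
  | cons a t ih =>
    intro j hj
    cases hq : q a with
    | false => rw [List.takeWhile_cons, hq] at hj; simp at hj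
    | true =>
      rw [List.takeWhile_cons, hq] at hj
      cases j with
      | zero => simpa using hq
      | succ j =>
        rw [List.getD_cons_succ]
        exact ih j (by simpa using hj)

lemma pvTW_false (q : Int → Bool) : ∀ (l : List Int),
    (l.takeWhile q).length < l.length → q (l.getD (l.takeWhile q).length 0) = false := by
  intro l
  induction l with
  | nil => simp
  | cons a t ih =>
    intro hl
    cases hq : q a with
    | false => simpa [List.takeWhile_cons, hq] using hq
    | true =>
      rw [List.takeWhile_cons, hq] at hl ⊢
      simpa using ih (by simpa using hl)

-- one insertion step preserves the invariant
lemma pvInsLoop_good (m : Int) (P J : List Int) (hP : P.Pairwise (· ≥ ·))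
    (hPpos : ∀ x ∈ P, 0 < x) (hJ : ∀ x ∈ J, x ≤ 0) (hJne : J ≠ []) :
    ∃ P' J', pvInsLoop m ((P ++ J).length - 1) (P ++ J) = P' ++ J' ∧
      P'.Pairwise (· ≥ ·) ∧ (∀ x ∈ P', 0 < x) ∧ (∀ x ∈ J', x ≤ 0) ∧
      P'.Perm ((if 0 < m then [m] else []) ++ P) ∧
      (P' ++ J').length = (P ++ J).length := by
  set p := P.length with hp'
  set q := J.length with hq'
  have hq1 : 1 ≤ q := by
    cases J with
    | nil => exact absurd rfl hJne
    | cons a t => simp [hq']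
  have hO : (P ++ J).length = p + q := by
    rw [List.length_append, ← hp', ← hq']
  set k := (P ++ J).length - 1 with hk'
  have hk : k < (P ++ J).length := by omega
  by_cases hm : 0 < m
  · -- positive number: it is inserted into the sorted prefix
    set s := (P.takeWhile (fun x => decide (m ≤ x))).length with hs'
    have hsp : s ≤ p := (List.takeWhile_sublist _).length_le
    have hdrop_lt : ∀ jj, s ≤ jj → jj < p → P.getD jj 0 < m := by
      intro jj h1 h2
      have hfail : decide (m ≤ P.getD s 0) = false := pvTW_false (fun x => decide (m ≤ x)) P (by omega)
      have h3 : ¬ m ≤ P.getD s 0 := of_decide_eq_false hfail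
      have h4 : P.getD jj 0 ≤ P.getD s 0 := pvPairwise_getD P hP s jj h1 h2
      omega
    have hstop : s = 0 ∨ (1 ≤ s ∧ m ≤ (P ++ J).getD (s - 1) 0) := by
      rcases Nat.eq_zero_or_pos s with h0 | h1
      · exact Or.inl h0
      · refine Or.inr ⟨h1, ?_⟩
        rw [pvGetD_append_left _ _ _ (by omega)]
        exact of_decide_eq_true (pvTW_true (fun x => decide (m ≤ x)) P (s - 1) (by omega))
    have hshift : ∀ i, s < i → i ≤ k → (P ++ J).getD (i - 1) 0 < m := by
      intro i hi1 hi2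
      by_cases hjp : i - 1 < p
      · rw [pvGetD_append_left _ _ _ hjp]
        exact hdrop_lt (i - 1) (by omega) hjp
      · rw [pvGetD_append_right _ _ _ (by omega)]
        have := hJ (J.getD (i - 1 - P.length) 0) (pvGetD_mem J (i - 1 - P.length) (by omega))
        omega
    rw [pvInsLoop_eq m k s (P ++ J) hk (by omega) hstop hshift]
    have e0 : (P ++ J).drop (k + 1) = [] := List.drop_eq_nil_of_le (by omega)
    have e1 : (P ++ J).take s = P.take s := List.take_append_of_le_length (by omega)
    have e2 : (P ++ J).drop s = P.drop s ++ J := List.drop_append_of_le_length (by omega)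
    have e3 : (P.drop s ++ J).take (k - s) = P.drop s ++ J.dropLast := by
      have hlen : (P.drop s).length = P.length - s := by simp
      have hks : k - s = (P.drop s).length + (J.length - 1) := by rw [hlen]; omega
      rw [hks, List.take_append, List.take_of_length_le (Nat.le_add_right _ _),
        Nat.add_sub_cancel_left, ← List.dropLast_eq_take]
    have htake_ge : ∀ a ∈ P.take s, m ≤ a := by
      intro a ha
      obtain ⟨i, hi, rfl⟩ := List.getElem_of_mem ha
      have hi' : i < s := by simp at hi; omega
      rw [List.getElem_take]
      rw [← pvGetD_eq P i (by omega)]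
      have h5 : m ≤ P.getD (s - 1) 0 :=
        of_decide_eq_true (pvTW_true (fun x => decide (m ≤ x)) P (s - 1) (by omega))
      have h6 : P.getD (s - 1) 0 ≤ P.getD i 0 :=
        pvPairwise_getD P hP i (s - 1) (by omega) (by omega)
      omega
    have hdropm : ∀ b ∈ P.drop s, b < m := by
      intro b hb
      obtain ⟨i, hi, rfl⟩ := List.getElem_of_mem hb
      rw [List.getElem_drop]
      rw [← pvGetD_eq P (s + i) (by simp at hi; omega)]
      exact hdrop_lt (s + i) (by omega) (by simp at hi; omega)
    refine ⟨P.take s ++ m :: P.drop s, J.dropLast, ?_, ?_, ?_, ?_, ?_, ?_⟩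
    · rw [e0, e1, e2, e3]
      simp
    · rw [List.pairwise_append]
      refine ⟨List.Pairwise.sublist (List.take_sublist _ _) hP, ?_, ?_⟩
      · rw [List.pairwise_cons]
        exact ⟨fun b hb => le_of_lt (hdropm b hb),
          List.Pairwise.sublist (List.drop_sublist _ _) hP⟩
      · intro a ha b hb
        rcases List.mem_cons.mp hb with rfl | hb'
        · exact htake_ge a ha
        · have := hdropm b hb'
          have := htake_ge a ha
          omega
    · intro x hx
      rcases List.mem_append.mp hx with hx' | hx'
      · exact hPpos x (List.Sublist.subset (List.take_sublist _ _) hx')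
      · rcases List.mem_cons.mp hx' with rfl | hx''
        · exact hm
        · exact hPpos x (List.Sublist.subset (List.drop_sublist _ _) hx'')
    · intro x hx
      exact hJ x (List.Sublist.subset (List.dropLast_sublist _) hx)
    · rw [if_pos hm]
      refine List.Perm.trans List.perm_middle ?_
      rw [List.take_append_drop]
      exact List.Perm.refl _
    · simp
      omega
  · -- non-positive number: only the junk region is disturbed
    have hm' : m ≤ 0 := by omega
    set R := ((P ++ J).take k).reverse with hR'
    have hRlen : R.length = k := by simp [hR']; omega
    have hRget : ∀ j, j < k → R.getD j 0 = (P ++ J).getD (k - 1 - j) 0 := by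
      intro j hj
      rw [hR', pvGetD_reverse _ j (by simp; omega)]
      have hl : ((P ++ J).take k).length = k := by simp; omega
      rw [hl, pvGetD_take _ k (k - 1 - j) (by omega)]
    set t := (R.takeWhile (fun x => decide (x < m))).length with ht'
    have ht : t ≤ k := le_trans (List.takeWhile_sublist _).length_le (le_of_eq hRlen)
    set s := k - t with hs'
    have hsge : p ≤ s := by
      by_contra hcon
      push_neg at hcon
      have hp1 : 1 ≤ p := by omega
      have htgt : k - p < t := by omega
      have hpred : decide (R.getD (k - p) 0 < m) = true := pvTW_true (fun x => decide (x < m)) R (k - p) htgt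
      rw [hRget (k - p) (by omega)] at hpred
      have harith : k - 1 - (k - p) = p - 1 := by omega
      rw [harith, pvGetD_append_left _ _ _ (by omega)] at hpred
      have hpos := hPpos (P.getD (p - 1) 0) (pvGetD_mem P (p - 1) (by omega))
      have := of_decide_eq_true hpred
      omega
    have hstop : s = 0 ∨ (1 ≤ s ∧ m ≤ (P ++ J).getD (s - 1) 0) := by
      rcases Nat.eq_or_lt_of_le ht with he | hlt
      · exact Or.inl (by omega)
      · refine Or.inr ⟨by omega, ?_⟩
        have hfail : decide (R.getD t 0 < m) = false := pvTW_false (fun x => decide (x < m)) R (by omega)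
        rw [hRget t (by omega)] at hfail
        have harith : k - 1 - t = s - 1 := by omega
        rw [harith] at hfail
        have := of_decide_eq_false hfail
        omega
    have hshift : ∀ i, s < i → i ≤ k → (P ++ J).getD (i - 1) 0 < m := by
      intro i hi1 hi2
      have hjt : k - i < t := by omega
      have hpred : decide (R.getD (k - i) 0 < m) = true := pvTW_true (fun x => decide (x < m)) R (k - i) hjt
      rw [hRget (k - i) (by omega)] at hpred
      have harith : k - 1 - (k - i) = i - 1 := by omega
      rw [harith] at hpred
      exact of_decide_eq_true hpred
    rw [pvInsLoop_eq m k s (P ++ J) hk (by omega) hstop hshift]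
    have e0 : (P ++ J).drop (k + 1) = [] := List.drop_eq_nil_of_le (by omega)
    have e1 : (P ++ J).take s = P ++ J.take (s - p) := by
      rw [List.take_append, List.take_of_length_le (by omega)]
    have e2 : (P ++ J).drop s = J.drop (s - p) := by
      rw [List.drop_append, List.drop_eq_nil_of_le (by omega), List.nil_append]
    refine ⟨P, J.take (s - p) ++ m :: (J.drop (s - p)).take (k - s), ?_, hP, hPpos, ?_, ?_, ?_⟩
    · rw [e0, e1, e2]
      simp
    · intro x hx
      rcases List.mem_append.mp hx with hx' | hx'
      · exact hJ x (List.Sublist.subset (List.take_sublist _ _) hx')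
      · rcases List.mem_cons.mp hx' with rfl | hx''
        · exact hm'
        · exact hJ x (List.Sublist.subset
            (List.Sublist.trans (List.take_sublist _ _) (List.drop_sublist _ _)) hx'')
    · rw [if_neg hm]
      exact List.Perm.refl _
    · simp
      omega

-- the outer insertion-sort fold preserves the invariant
lemma pvInsFold (N : Nat) : ∀ (nums P J : List Int), (P ++ J).length = N →
    P.Pairwise (· ≥ ·) → (∀ x ∈ P, 0 < x) → (∀ x ∈ J, x ≤ 0) →
    P.length + nums.length ≤ N →
    ∃ P' J', nums.foldl (fun o num => pvInsLoop num (N - 1) o) (P ++ J) = P' ++ J' ∧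
      P'.Pairwise (· ≥ ·) ∧ (∀ x ∈ P', 0 < x) ∧ (∀ x ∈ J', x ≤ 0) ∧
      P'.Perm (nums.filter (fun x => decide (0 < x)) ++ P) ∧ (P' ++ J').length = N := by
  intro nums
  induction nums with
  | nil =>
    intro P J hlen hP hpos hJ hcnt
    exact ⟨P, J, rfl, hP, hpos, hJ, by simp, hlen⟩
  | cons num rest ih =>
    intro P J hlen hP hpos hJ hcnt
    have hlen' : P.length + J.length = N := by
      rw [← hlen]; simp
    have hcnt' : P.length + (rest.length + 1) ≤ N := by
      simpa [Nat.add_comm] using hcnt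
    have hJne : J ≠ [] := by
      intro hnil
      rw [hnil] at hlen'
      simp at hlen'
      omega
    obtain ⟨P1, J1, heq, hP1, hpos1, hJ1, hperm1, hlen1⟩ :=
      pvInsLoop_good num P J hP hpos hJ hJne
    have heq' : pvInsLoop num (N - 1) (P ++ J) = P1 ++ J1 := by
      rw [← hlen]; exact heq
    have hlen1' : (P1 ++ J1).length = N := by rw [hlen1, hlen]
    have hP1len : P1.length ≤ P.length + 1 := by
      have := hperm1.length_eq
      by_cases h0 : 0 < num <;> simp [h0] at this <;> omega
    simp only [List.foldl_cons]
    rw [heq']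
    obtain ⟨P', J', hfeq, hP', hpos', hJ', hperm', hlenf⟩ :=
      ih P1 J1 hlen1' hP1 hpos1 hJ1 (by omega)
    refine ⟨P', J', hfeq, hP', hpos', hJ', ?_, hlenf⟩
    by_cases h0 : 0 < num
    · rw [if_pos h0] at hperm1
      rw [List.filter_cons, if_pos (by simpa using h0)]
      refine hperm'.trans ?_
      refine (List.Perm.append_left (rest.filter (fun x => decide (0 < x))) hperm1).trans ?_
      show (rest.filter (fun x => decide (0 < x)) ++ ([num] ++ P)).Perm _
      rw [← List.append_assoc]
      exact List.Perm.append_right P (List.perm_append_singleton num _).symm.symm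
    · rw [if_neg h0] at hperm1
      rw [List.filter_cons, if_neg (by simpa using h0)]
      exact hperm'.trans (List.Perm.append_left _ (by simpa using hperm1))

-- reading T[start+idx] over range(n) is a fold over the segment
lemma pvReadFold (g : List Int → Int → List Int) (T : List Int) (start : Int)
    (hs : 0 ≤ start) : ∀ (n : Nat) (init : List Int), start.toNat + n ≤ T.length →
    (List.range n).foldl (fun (o : List Int) (idx : Nat) => g o (PySem.List.pyGetD T (start + (idx : Int)) 0)) init =
      ((T.drop start.toNat).take n).foldl g init := by
  intro n
  induction n with
  | zero => intro init _; simp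
  | succ n ih =>
    intro init h
    rw [List.range_succ, List.foldl_append, ih init (by omega)]
    have hidx : n < (T.drop start.toNat).length := by simp; omega
    have hsplit : (T.drop start.toNat).take (n + 1) =
        (T.drop start.toNat).take n ++ [(T.drop start.toNat)[n]] :=
      List.take_succ_eq_append_getElem hidx
    rw [hsplit, List.foldl_append]
    simp only [List.foldl_cons, List.foldl_nil]
    congr 1
    have hc : start + ((n : Nat) : Int) = ((start.toNat + n : Nat) : Int) := by omega
    rw [hc, PySem.List.pyGetD_natCast, pvGetD_eq T (start.toNat + n) (by omega)]
    rw [List.getElem_drop]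

lemma pvInsertionSort_good (T : List Int) (start end_ : Int) (h0 : 0 ≤ start)
    (h1 : start ≤ end_ + 1) (h2 : end_ < T.length) :
    GoodFor ((T.drop start.toNat).take (end_ - start + 1).toNat)
      (pvInsertionSort T start end_) := by
  have hbound : start.toNat + (end_ - start + 1).toNat ≤ T.length := by omega
  have hseglen : ((T.drop start.toNat).take (end_ - start + 1).toNat).length =
      (end_ - start + 1).toNat := by simp; omega
  simp only [pvInsertionSort]
  rw [pvReadFold (fun o num => pvInsLoop num ((end_ - start + 1).toNat - 1) o) T start h0
    (end_ - start + 1).toNat _ hbound]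
  obtain ⟨P', J', hfeq, hP', hpos', hJ', hperm', hlenf⟩ :=
    pvInsFold (end_ - start + 1).toNat ((T.drop start.toNat).take (end_ - start + 1).toNat)
      [] (List.replicate (end_ - start + 1).toNat 0) (by simp) (by simp) (by simp)
      (by intro x hx; rw [List.eq_of_mem_replicate hx])
      (by rw [hseglen]; simp)
  have hfeq' : List.foldl (fun o num => pvInsLoop num ((end_ - start + 1).toNat - 1) o)
      (List.replicate (end_ - start + 1).toNat 0)
      (List.take (end_ - start + 1).toNat (List.drop start.toNat T)) = P' ++ J' := by
    simpa using hfeq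
  refine ⟨P', J', hfeq', hP', hpos', hJ', by simpa using hperm', ?_⟩
  rw [hfeq', hlenf, hseglen]

-- writing at the first free slot of the zero-padded output buffer
lemma pvWriteStep (acc : List Int) (r : Nat) (v : Int) (hr : 1 ≤ r) :
    (acc ++ List.replicate r 0).set acc.length v = (acc ++ [v]) ++ List.replicate (r - 1) 0 := by
  rw [List.set_append_right _ _ (le_refl _), Nat.sub_self]
  cases r with
  | zero => omega
  | succ r => simp [List.replicate_succ]

-- the two copy loops of merge
lemma pvMergeLoop2_eq (T : List Int) : ∀ (fuel s1 : Nat) (acc : List Int) (r : Nat),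
    T.length - s1 ≤ fuel → s1 ≤ T.length → T.length - s1 ≤ r →
    pvMergeLoop2 T s1 acc.length (acc ++ List.replicate r 0) =
      (T.length, acc.length + (T.length - s1),
        (acc ++ T.drop s1) ++ List.replicate (r - (T.length - s1)) 0) := by
  intro fuel
  induction fuel with
  | zero =>
    intro s1 acc r h0 h1 h2
    have hs : s1 = T.length := by omega
    rw [pvMergeLoop2, if_neg (by omega)]
    subst hs
    simp [List.drop_length]
  | succ fuel ih =>
    intro s1 acc r h0 h1 h2
    by_cases hs : s1 < T.length
    · rw [pvMergeLoop2, if_pos hs]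
      have hr : 1 ≤ r := by omega
      rw [PySem.List.pySetD_natCast, PySem.List.pyGetD_natCast, pvWriteStep acc r _ hr]
      have hlen : acc.length + 1 = (acc ++ [T.getD s1 0]).length := by simp
      rw [hlen, ih (s1 + 1) (acc ++ [T.getD s1 0]) (r - 1) (by omega) (by omega) (by omega)]
      have hdrop : T.drop s1 = T.getD s1 0 :: T.drop (s1 + 1) := by
        rw [pvGetD_eq T s1 hs]; exact List.drop_eq_getElem_cons hs
      rw [hdrop]
      have ha : (r - 1) - (T.length - (s1 + 1)) = r - (T.length - s1) := by omega
      rw [ha]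
      have hb : (acc ++ [T.getD s1 0]).length + (T.length - (s1 + 1)) =
          acc.length + (T.length - s1) := by simp; omega
      rw [hb]
      simp
    · rw [pvMergeLoop2, if_neg hs]
      have hs' : s1 = T.length := by omega
      subst hs'
      simp [List.drop_length]

lemma pvMergeLoop3_eq (S : List Int) : ∀ (fuel s2 : Nat) (acc : List Int) (r : Nat),
    S.length - s2 ≤ fuel → s2 ≤ S.length → S.length - s2 ≤ r →
    pvMergeLoop3 S s2 acc.length (acc ++ List.replicate r 0) =
      (S.length, acc.length + (S.length - s2),
        (acc ++ S.drop s2) ++ List.replicate (r - (S.length - s2)) 0) := by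
  intro fuel
  induction fuel with
  | zero =>
    intro s2 acc r h0 h1 h2
    have hs : s2 = S.length := by omega
    rw [pvMergeLoop3, if_neg (by omega)]
    subst hs
    simp [List.drop_length]
  | succ fuel ih =>
    intro s2 acc r h0 h1 h2
    by_cases hs : s2 < S.length
    · rw [pvMergeLoop3, if_pos hs]
      have hr : 1 ≤ r := by omega
      rw [PySem.List.pySetD_natCast, PySem.List.pyGetD_natCast, pvWriteStep acc r _ hr]
      have hlen : acc.length + 1 = (acc ++ [S.getD s2 0]).length := by simp
      rw [hlen, ih (s2 + 1) (acc ++ [S.getD s2 0]) (r - 1) (by omega) (by omega) (by omega)]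
      have hdrop : S.drop s2 = S.getD s2 0 :: S.drop (s2 + 1) := by
        rw [pvGetD_eq S s2 hs]; exact List.drop_eq_getElem_cons hs
      rw [hdrop]
      have ha : (r - 1) - (S.length - (s2 + 1)) = r - (S.length - s2) := by omega
      rw [ha]
      have hb : (acc ++ [S.getD s2 0]).length + (S.length - (s2 + 1)) =
          acc.length + (S.length - s2) := by simp; omega
      rw [hb]
      simp
    · rw [pvMergeLoop3, if_neg hs]
      have hs' : s2 = S.length := by omega
      subst hs'
      simp [List.drop_length]

lemma pvMrg_nil_right : ∀ (L : List Int), pvMrg L [] = L := by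
  intro L; cases L <;> simp [pvMrg]

-- the whole three-loop merge computes the functional merge
lemma pvMerge_eq_aux (T S : List Int) : ∀ (fuel s1 s2 : Nat) (acc : List Int),
    (T.length - s1) + (S.length - s2) ≤ fuel → s1 ≤ T.length → s2 ≤ S.length →
    (let r1 := pvMergeLoop1 T S s1 s2 acc.length
        (acc ++ List.replicate ((T.length - s1) + (S.length - s2)) 0);
     let r2 := pvMergeLoop2 T r1.1 r1.2.2.1 r1.2.2.2;
     let r3 := pvMergeLoop3 S r1.2.1 r2.2.1 r2.2.2;
     r3.2.2) = acc ++ pvMrg (T.drop s1) (S.drop s2) := by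
  intro fuel
  induction fuel with
  | zero =>
    intro s1 s2 acc h0 h1 h2
    have hs1 : s1 = T.length := by omega
    have hs2 : s2 = S.length := by omega
    dsimp only
    rw [pvMergeLoop1, if_neg (by omega)]
    dsimp only
    rw [pvMergeLoop2, if_neg (by omega)]
    dsimp only
    rw [pvMergeLoop3, if_neg (by omega)]
    rw [List.drop_eq_nil_of_le (by omega), List.drop_eq_nil_of_le (by omega)]
    have hrem : (T.length - s1) + (S.length - s2) = 0 := by omega
    rw [hrem]
    simp [pvMrg]
  | succ fuel ih =>
    intro s1 s2 acc h0 h1 h2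
    dsimp only
    by_cases hb : s1 < T.length ∧ s2 < S.length
    · rw [pvMergeLoop1, if_pos hb]
      have hd1 : T.drop s1 = T.getD s1 0 :: T.drop (s1 + 1) := by
        rw [pvGetD_eq T s1 (by omega)]
        exact List.drop_eq_getElem_cons (by omega)
      have hd2 : S.drop s2 = S.getD s2 0 :: S.drop (s2 + 1) := by
        rw [pvGetD_eq S s2 (by omega)]
        exact List.drop_eq_getElem_cons (by omega)
      split_ifs with hcmp
      · -- take the head of T
        rw [PySem.List.pyGetD_natCast, PySem.List.pyGetD_natCast] at hcmp
        rw [PySem.List.pySetD_natCast, PySem.List.pyGetD_natCast,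
          pvWriteStep acc _ _ (by omega)]
        have e1 : acc.length + 1 = (acc ++ [T.getD s1 0]).length := by simp
        have e2 : (T.length - s1) + (S.length - s2) - 1
            = (T.length - (s1 + 1)) + (S.length - s2) := by omega
        rw [e1, e2]
        have hI := ih (s1 + 1) s2 (acc ++ [T.getD s1 0]) (by omega) (by omega) h2
        dsimp only at hI
        rw [hI, hd1, hd2, pvMrg, if_pos hcmp]
        simp
      · -- take the head of S
        rw [PySem.List.pyGetD_natCast, PySem.List.pyGetD_natCast] at hcmp
        rw [PySem.List.pySetD_natCast, PySem.List.pyGetD_natCast,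
          pvWriteStep acc _ _ (by omega)]
        have e1 : acc.length + 1 = (acc ++ [S.getD s2 0]).length := by simp
        have e2 : (T.length - s1) + (S.length - s2) - 1
            = (T.length - s1) + (S.length - (s2 + 1)) := by omega
        rw [e1, e2]
        have hI := ih s1 (s2 + 1) (acc ++ [S.getD s2 0]) (by omega) h1 (by omega)
        dsimp only at hI
        rw [hI, hd1, hd2, pvMrg, if_neg hcmp]
        simp
    · rw [pvMergeLoop1, if_neg hb]
      dsimp only
      by_cases hs1 : s1 < T.length
      · -- the S side is exhausted
        have hs2 : s2 = S.length := by omega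
        subst hs2
        have hrem : (T.length - s1) + (S.length - S.length) = T.length - s1 := by omega
        rw [hrem]
        rw [pvMergeLoop2_eq T T.length s1 acc (T.length - s1) (by omega) (by omega) le_rfl]
        dsimp only
        rw [pvMergeLoop3, if_neg (by omega)]
        dsimp only
        rw [List.drop_length, pvMrg_nil_right]
        simp
      · -- the T side is exhausted
        have hs1' : s1 = T.length := by omega
        subst hs1'
        have hrem : (T.length - T.length) + (S.length - s2) = S.length - s2 := by omega
        rw [hrem]
        rw [pvMergeLoop2, if_neg (by omega)]
        dsimp only
        rw [pvMergeLoop3_eq S S.length s2 acc (S.length - s2) (by omega) (by omega) le_rfl]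
        dsimp only
        rw [List.drop_length]
        simp [pvMrg]

lemma pvMerge_eq (T S : List Int) : pvMerge T S = pvMrg T S := by
  have h := pvMerge_eq_aux T S (T.length + S.length) 0 0 [] (by omega) (by omega) (by omega)
  simp only [List.length_nil, Nat.sub_zero, List.nil_append, List.drop_zero] at h
  simp only [pvMerge]
  exact h

lemma pvMrg_length : ∀ (L R : List Int), (pvMrg L R).length = L.length + R.length := by
  intro L
  induction L with
  | nil => intro R; simp [pvMrg]
  | cons x xs ihx =>
    intro R
    induction R with
    | nil => simp [pvMrg]
    | cons y ys ihy =>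
      rw [pvMrg]
      split_ifs
      · simp [ihx (y :: ys)]; omega
      · simp [ihy]; omega

lemma pvMrg_junk : ∀ (L R : List Int), (∀ x ∈ L, x ≤ 0) → (∀ x ∈ R, x ≤ 0) →
    ∀ x ∈ pvMrg L R, x ≤ 0 := by
  intro L
  induction L with
  | nil => intro R _ hR; simpa [pvMrg] using hR
  | cons x xs ihx =>
    intro R
    induction R with
    | nil => intro hL _; simpa [pvMrg] using hL
    | cons y ys ihy =>
      intro hL hR
      rw [pvMrg]
      split_ifs
      · intro z hz
        rcases List.mem_cons.mp hz with rfl | hz'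
        · exact hL z List.mem_cons_self
        · exact ihx (y :: ys) (fun a ha => hL a (List.mem_cons_of_mem _ ha)) hR z hz'
      · intro z hz
        rcases List.mem_cons.mp hz with rfl | hz'
        · exact hR z List.mem_cons_self
        · exact ihy (fun a ha => hL a ha) (fun a ha => hR a (List.mem_cons_of_mem _ ha)) z hz'

-- merging junk with a good list, and a good list with junk
lemma pvMrg_junk_good : ∀ (P2 : List Int) (J J2 : List Int), (∀ x ∈ J, x ≤ 0) →
    (∀ x ∈ P2, 0 < x) → pvMrg J (P2 ++ J2) = P2 ++ pvMrg J J2 := by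
  intro P2
  induction P2 with
  | nil => intro J J2 _ _; simp
  | cons p P2' ih =>
    intro J J2 hJ hpos
    cases J with
    | nil => simp [pvMrg]
    | cons j J' =>
      have hle : ¬ j > p := by
        have h1 := hJ j List.mem_cons_self
        have h2 := hpos p List.mem_cons_self
        omega
      rw [List.cons_append, pvMrg, if_neg hle,
        ih (j :: J') J2 hJ (fun y hy => hpos y (List.mem_cons_of_mem _ hy))]
      simp

lemma pvMrg_good_junk : ∀ (P1 : List Int) (J1 J : List Int), (∀ x ∈ P1, 0 < x) →
    (∀ x ∈ J, x ≤ 0) → pvMrg (P1 ++ J1) J = P1 ++ pvMrg J1 J := by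
  intro P1
  induction P1 with
  | nil => intro J1 J _ _; simp
  | cons p P1' ih =>
    intro J1 J hpos hJ
    cases J with
    | nil => rw [pvMrg_nil_right, pvMrg_nil_right]
    | cons j J' =>
      have hgt : p > j := by
        have h1 := hJ j List.mem_cons_self
        have h2 := hpos p List.mem_cons_self
        omega
      rw [List.cons_append, pvMrg, if_pos hgt,
        ih J1 (j :: J') (fun y hy => hpos y (List.mem_cons_of_mem _ hy)) hJ]
      simp

-- merging two invariant-shaped lists gives an invariant-shaped list
lemma pvMrg_good : ∀ (P1 J1 P2 J2 : List Int),
    P1.Pairwise (· ≥ ·) → (∀ x ∈ P1, 0 < x) → (∀ x ∈ J1, x ≤ 0) →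
    P2.Pairwise (· ≥ ·) → (∀ x ∈ P2, 0 < x) → (∀ x ∈ J2, x ≤ 0) →
    ∃ P J, pvMrg (P1 ++ J1) (P2 ++ J2) = P ++ J ∧ P.Pairwise (· ≥ ·) ∧
      (∀ x ∈ P, 0 < x) ∧ (∀ x ∈ J, x ≤ 0) ∧ P.Perm (P1 ++ P2) := by
  suffices h : ∀ (fuel : Nat) (P1 J1 P2 J2 : List Int), P1.length + P2.length ≤ fuel →
      P1.Pairwise (· ≥ ·) → (∀ x ∈ P1, 0 < x) → (∀ x ∈ J1, x ≤ 0) →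
      P2.Pairwise (· ≥ ·) → (∀ x ∈ P2, 0 < x) → (∀ x ∈ J2, x ≤ 0) →
      ∃ P J, pvMrg (P1 ++ J1) (P2 ++ J2) = P ++ J ∧ P.Pairwise (· ≥ ·) ∧
        (∀ x ∈ P, 0 < x) ∧ (∀ x ∈ J, x ≤ 0) ∧ P.Perm (P1 ++ P2) by
    intro P1 J1 P2 J2 h1 h2 h3 h4 h5 h6
    exact h (P1.length + P2.length) P1 J1 P2 J2 le_rfl h1 h2 h3 h4 h5 h6
  intro fuel
  induction fuel with
  | zero =>
    intro P1 J1 P2 J2 hf hP1 hpos1 hJ1 hP2 hpos2 hJ2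
    have h1 : P1 = [] := List.eq_nil_of_length_eq_zero (by omega)
    have h2 : P2 = [] := List.eq_nil_of_length_eq_zero (by omega)
    subst h1; subst h2
    exact ⟨[], pvMrg J1 J2, by simp, by simp, by simp,
      pvMrg_junk _ _ hJ1 hJ2, by simp⟩
  | succ fuel ih =>
    intro P1 J1 P2 J2 hf hP1 hpos1 hJ1 hP2 hpos2 hJ2
    cases P1 with
    | nil =>
      rw [List.nil_append, pvMrg_junk_good P2 J1 J2 hJ1 hpos2]
      exact ⟨P2, pvMrg J1 J2, rfl, hP2, hpos2, pvMrg_junk _ _ hJ1 hJ2, by simp⟩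
    | cons p1 P1' =>
      cases P2 with
      | nil =>
        rw [List.nil_append, pvMrg_good_junk (p1 :: P1') J1 J2 hpos1 hJ2]
        exact ⟨p1 :: P1', pvMrg J1 J2, rfl, hP1, hpos1, pvMrg_junk _ _ hJ1 hJ2, by simp⟩
      | cons p2 P2' =>
        by_cases hc : p1 > p2
        · rw [List.cons_append, List.cons_append, pvMrg, if_pos hc]
          obtain ⟨P, J, heq, hPp, hPpos, hJJ, hperm⟩ :=
            ih P1' J1 (p2 :: P2') J2 (by simp at hf ⊢; omega)
              (List.Pairwise.of_cons hP1) (fun y hy => hpos1 y (List.mem_cons_of_mem _ hy))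
              hJ1 hP2 hpos2 hJ2
          rw [List.cons_append] at heq
          refine ⟨p1 :: P, J, by rw [heq]; simp, ?_, ?_, hJJ, ?_⟩
          · rw [List.pairwise_cons]
            refine ⟨?_, hPp⟩
            intro b hb
            have hb' : b ∈ P1' ++ (p2 :: P2') := hperm.mem_iff.mp hb
            rcases List.mem_append.mp hb' with hb1 | hb2
            · exact List.rel_of_pairwise_cons hP1 hb1
            · rcases List.mem_cons.mp hb2 with rfl | hb3
              · omega
              · have := List.rel_of_pairwise_cons hP2 hb3
                omega
          · intro y hy
            rcases List.mem_cons.mp hy with rfl | hy'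
            · exact hpos1 y List.mem_cons_self
            · exact hPpos y hy'
          · exact (hperm.cons p1).trans (by simp)
        · rw [List.cons_append, List.cons_append, pvMrg, if_neg hc]
          obtain ⟨P, J, heq, hPp, hPpos, hJJ, hperm⟩ :=
            ih (p1 :: P1') J1 P2' J2 (by simp at hf ⊢; omega)
              hP1 hpos1 hJ1 (List.Pairwise.of_cons hP2)
              (fun y hy => hpos2 y (List.mem_cons_of_mem _ hy)) hJ2
          rw [List.cons_append] at heq
          refine ⟨p2 :: P, J, by rw [heq]; simp, ?_, ?_, hJJ, ?_⟩
          · rw [List.pairwise_cons]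
            refine ⟨?_, hPp⟩
            intro b hb
            have hb' : b ∈ (p1 :: P1') ++ P2' := hperm.mem_iff.mp hb
            rcases List.mem_append.mp hb' with hb1 | hb2
            · rcases List.mem_cons.mp hb1 with rfl | hb3
              · omega
              · have := List.rel_of_pairwise_cons hP1 hb3
                omega
            · exact List.rel_of_pairwise_cons hP2 hb2
          · intro y hy
            rcases List.mem_cons.mp hy with rfl | hy'
            · exact hpos2 y List.mem_cons_self
            · exact hPpos y hy'
          · refine (hperm.cons p2).trans ?_
            show (p2 :: ((p1 :: P1') ++ P2')).Perm ((p1 :: P1') ++ (p2 :: P2'))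
            exact List.perm_middle.symm

lemma pvMergeSort_good : ∀ (N : Nat) (T : List Int) (start end_ : Int),
    (end_ - start).toNat ≤ N → 0 ≤ start → start ≤ end_ + 1 → end_ < T.length →
    GoodFor ((T.drop start.toNat).take (end_ - start + 1).toNat)
      (pvMergeSort T start end_) := by
  intro N
  induction N using Nat.strong_induction_on with
  | _ N ih =>
    intro T start end_ hN h0 h1 h2
    rw [pvMergeSort]
    by_cases hsmall : end_ - start < 41
    · rw [if_pos hsmall]
      exact pvInsertionSort_good T start end_ h0 h1 h2
    · rw [if_neg hsmall]
      have hfd : PySem.Int.floordiv (end_ - start) 2 = (end_ - start) / 2 := by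
        simp only [PySem.Int.floordiv]
        exact Int.fdiv_eq_ediv_of_nonneg _ (by norm_num)
      set mid := start + PySem.Int.floordiv (end_ - start) 2 with hmid
      have hmid' : mid = start + (end_ - start) / 2 := by rw [hmid, hfd]
      have hn41 : 41 ≤ end_ - start := by omega
      have hb1 : start ≤ mid ∧ mid < end_ := by
        constructor <;> omega
      have g1 := ih ((mid - start).toNat) (by omega) T start mid le_rfl h0 (by omega) (by omega)
      have g2 := ih ((end_ - (mid + 1)).toNat) (by omega) T (mid + 1) end_ le_rfl (by omega)
        (by omega) h2
      rw [pvMerge_eq]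
      obtain ⟨P1, J1, e1, q1, r1, s1, t1, l1⟩ := g1
      obtain ⟨P2, J2, e2, q2, r2, s2, t2, l2⟩ := g2
      rw [e1] at l1
      rw [e2] at l2
      rw [e1, e2]
      obtain ⟨P, J, he, hp, hq, hr, hs⟩ := pvMrg_good P1 J1 P2 J2 q1 r1 s1 q2 r2 s2
      have hseg : ((T.drop start.toNat).take (mid - start + 1).toNat)
          ++ ((T.drop (mid + 1).toNat).take (end_ - (mid + 1) + 1).toNat)
          = (T.drop start.toNat).take (end_ - start + 1).toNat := by
        have hdd : T.drop (mid + 1).toNat = (T.drop start.toNat).drop (mid - start + 1).toNat := by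
          rw [List.drop_drop]
          congr 1
          omega
        rw [hdd, ← List.take_add]
        congr 1
        omega
      refine ⟨P, J, he, hp, hq, hr, ?_, ?_⟩
      · refine hs.trans ?_
        have := (t1.append t2)
        refine this.trans ?_
        rw [← List.filter_append, hseg]
      · rw [he]
        have hlen2 := congrArg List.length hseg
        rw [List.length_append] at hlen2
        have hml : (P ++ J).length = (P1 ++ J1).length + (P2 ++ J2).length := by
          rw [← he, pvMrg_length]
        omega

-- ========== scan characterisation ==========

-- functional form of the accumulation loop: walk the list, day counter as Int
def pvAscan : List Int → Int → Int → Int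
  | [], out, _ => out
  | x :: xs, out, day => if x > day then pvAscan xs (out + x - day) (day + 1) else out

lemma pvAscan_shift : ∀ (l : List Int) (out t day : Int),
    pvAscan l (out + t) day = pvAscan l out day + t := by
  intro l
  induction l with
  | nil => intro out t day; rfl
  | cons x xs ih =>
    intro out t day
    simp only [pvAscan]
    split_ifs with h
    · have : out + t + x - day = out + x - day + t := by ring
      rw [this, ih]
    · rfl

-- the A-side while loop is pvAscan of the tail
lemma pvSnowLoopA_eq : ∀ (k : Nat) (L : List Int) (day : Nat) (out : Int),
    L.length - day ≤ k → pvSnowLoopA L out day = pvAscan (L.drop day) out (day : Int) := by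
  intro k
  induction k with
  | zero =>
    intro L day out h
    rw [pvSnowLoopA, if_neg (by omega), List.drop_eq_nil_of_le (by omega)]
    rfl
  | succ k ih =>
    intro L day out h
    by_cases hd : day < L.length
    · have hdrop : L.drop day = L[day] :: L.drop (day + 1) := List.drop_eq_getElem_cons hd
      rw [pvSnowLoopA, if_pos hd, PySem.List.pyGetD_natCast, pvGetD_eq L day hd, hdrop]
      simp only [pvAscan]
      split_ifs with hc
      · rw [ih L (day + 1) _ (by omega)]
        push_cast
        ring_nf
      · rfl
    · rw [pvSnowLoopA, if_neg hd, List.drop_eq_nil_of_le (by omega)]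
      rfl

-- a junk tail is never entered by the scan
lemma pvAscan_junk : ∀ (P J : List Int) (out day : Int), (∀ x ∈ J, x ≤ 0) → 0 ≤ day →
    pvAscan (P ++ J) out day = pvAscan P out day := by
  intro P
  induction P with
  | nil =>
    intro J out day hJ hd
    cases J with
    | nil => rfl
    | cons x xs =>
      have : ¬ x > day := by
        have := hJ x List.mem_cons_self
        omega
      simp only [List.nil_append, pvAscan, if_neg this]
  | cons x xs ih =>
    intro J out day hJ hd
    simp only [List.cons_append, pvAscan]
    split_ifs with h
    · exact ih J _ _ hJ (by omega)
    · rfl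

-- ========== B-side characterisation ==========

-- clipping at n, as Source B computes it
def pvClip (n : Nat) (x : Int) : Int := if x < (n : Int) then x else (n : Int)

-- the descending list of clipped values the bucket walk of Source B traverses
def pvGenL (cnt : List Int) : Nat → List Int
  | 0 => []
  | v + 1 => List.replicate (PySem.List.pyGetD cnt ((v : Int) + 1) 0).toNat ((v : Int) + 1)
      ++ pvGenL cnt v

-- the inner loop consumes one bucket of the generated list
lemma pvInnerB_eq : ∀ (c : Nat) (v out day : Int) (rest : List Int),
    pvAscan (List.replicate c v ++ rest) out day =
      (match pvInnerB v c out day with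
       | Sum.inl (o, d) => pvAscan rest o d
       | Sum.inr o => o) := by
  intro c
  induction c with
  | zero => intro v out day rest; rfl
  | succ c ih =>
    intro v out day rest
    simp only [List.replicate_succ, List.cons_append, pvAscan, pvInnerB]
    split_ifs with h1 h2
    · omega
    · exact ih v _ _ rest
    · rfl
    · omega

-- the outer loop is the scan of the generated list, plus the excess
lemma pvOuterB_eq : ∀ (v : Nat) (cnt : List Int) (e out day : Int),
    pvOuterB cnt e v out day = pvAscan (pvGenL cnt v) out day + e := by
  intro v
  induction v with
  | zero => intro cnt e out day; rfl
  | succ v ih =>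
    intro cnt e out day
    simp only [pvOuterB, pvGenL]
    rw [pvInnerB_eq]
    rcases h : pvInnerB ((v : Int) + 1) (PySem.List.pyGetD cnt ((v : Int) + 1) 0).toNat out day with
      ⟨o, d⟩ | o
    · exact ih cnt e o d
    · rfl

-- members of the generated list lie in (0, v]
lemma pvGenL_mem (cnt : List Int) : ∀ (v : Nat) (x : Int), x ∈ pvGenL cnt v →
    1 ≤ x ∧ x ≤ (v : Int) := by
  intro v
  induction v with
  | zero => intro x hx; simp [pvGenL] at hx
  | succ v ih =>
    intro x hx
    rcases List.mem_append.mp hx with hx' | hx'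
    · have := List.eq_of_mem_replicate hx'
      subst this
      constructor <;> push_cast <;> omega
    · have := ih x hx'
      push_cast
      omega

-- the generated list is descending
lemma pvGenL_sorted (cnt : List Int) : ∀ (v : Nat), (pvGenL cnt v).Pairwise (· ≥ ·) := by
  intro v
  induction v with
  | zero => simp [pvGenL]
  | succ v ih =>
    rw [pvGenL, List.pairwise_append]
    refine ⟨by simp [List.pairwise_replicate], ih, ?_⟩
    intro a ha b hb
    have h1 := List.eq_of_mem_replicate ha
    have h2 := (pvGenL_mem cnt v b hb).2
    subst h1
    omega

-- counts in the generated list read off the bucket array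
lemma pvGenL_count (cnt : List Int) : ∀ (v : Nat) (a : Int),
    (pvGenL cnt v).count a =
      if 1 ≤ a ∧ a ≤ (v : Int) then (PySem.List.pyGetD cnt a 0).toNat else 0 := by
  intro v
  induction v with
  | zero =>
    intro a
    rw [if_neg (by omega)]
    simp [pvGenL]
  | succ v ih =>
    intro a
    rw [pvGenL, List.count_append, List.count_replicate, ih a]
    by_cases hav : a = (v : Int) + 1
    · rw [if_pos (by simp [hav]), if_neg (by omega), if_pos (by push_cast; omega), hav]
      omega
    · rw [if_neg (by simp [beq_iff_eq]; exact fun h => hav h.symm)]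
      by_cases hr : 1 ≤ a ∧ a ≤ (v : Int)
      · rw [if_pos hr, if_pos (by push_cast; omega)]
        omega
      · rw [if_neg hr, if_neg (by push_cast; omega)]

-- invariant of the counting fold of pvCountB
lemma pvCountB_fold (n : Nat) : ∀ (S : List Int) (c0 : List Int) (e0 : Int), c0.length = n + 1 →
    (S.foldl (fun (st : List Int × Int) x =>
      if x > 0 then
        let v : Int := if x < (n : Int) then x else (n : Int)
        (PySem.List.pySetD st.1 v (PySem.List.pyGetD st.1 v 0 + 1), st.2 + (x - v))
      else st) (c0, e0)).1.length = n + 1 ∧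
    (∀ a : Int, 1 ≤ a → a ≤ (n : Int) →
      (S.foldl (fun (st : List Int × Int) x =>
        if x > 0 then
          let v : Int := if x < (n : Int) then x else (n : Int)
          (PySem.List.pySetD st.1 v (PySem.List.pyGetD st.1 v 0 + 1), st.2 + (x - v))
        else st) (c0, e0)).1.getD a.toNat 0
        = c0.getD a.toNat 0 + (S.countP (fun x => decide (0 < x ∧ pvClip n x = a)) : Int)) ∧
    (S.foldl (fun (st : List Int × Int) x =>
      if x > 0 then
        let v : Int := if x < (n : Int) then x else (n : Int)
        (PySem.List.pySetD st.1 v (PySem.List.pyGetD st.1 v 0 + 1), st.2 + (x - v))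
      else st) (c0, e0)).2
      = e0 + ((S.filter (fun x => decide (0 < x))).map (fun x => x - pvClip n x)).sum := by
  intro S
  induction S with
  | nil =>
    intro c0 e0 hlen
    refine ⟨hlen, ?_, by simp⟩
    intro a _ _
    simp
  | cons x xs ih =>
    intro c0 e0 hlen
    simp only [List.foldl_cons]
    by_cases hx : x > 0
    · rw [if_pos hx]
      set v : Int := if x < (n : Int) then x else (n : Int) with hv'
      have hveq : v = pvClip n x := rfl
      have hv0 : 0 ≤ v := by rw [hv']; split_ifs <;> omega
      have hvn : v ≤ (n : Int) := by rw [hv']; split_ifs <;> omega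
      have hvc : v = ((v.toNat : Nat) : Int) := by omega
      have hset : PySem.List.pySetD c0 v (PySem.List.pyGetD c0 v 0 + 1)
          = c0.set v.toNat (c0.getD v.toNat 0 + 1) := by
        rw [hvc, PySem.List.pySetD_natCast, PySem.List.pyGetD_natCast]
        simp only [Int.toNat_natCast]
      have hlen1 : (c0.set v.toNat (c0.getD v.toNat 0 + 1)).length = n + 1 := by
        rw [List.length_set]; exact hlen
      obtain ⟨ihl, ihg, ihe⟩ := ih (c0.set v.toNat (c0.getD v.toNat 0 + 1)) (e0 + (x - v)) hlen1
      rw [hset]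
      refine ⟨ihl, ?_, ?_⟩
      · intro a ha han
        rw [ihg a ha han, List.countP_cons]
        by_cases hav : v = a
        · have hnat : a.toNat = v.toNat := by omega
          have hget : (c0.set v.toNat (c0.getD v.toNat 0 + 1)).getD a.toNat 0
              = c0.getD a.toNat 0 + 1 := by
            rw [hnat]
            have hin : v.toNat < c0.length := by omega
            simp [List.getD_eq_getElem?_getD, List.getElem?_set_self hin,
              List.getD_eq_getElem c0 0 hin]
          rw [hget]
          have hpred : (decide (0 < x ∧ pvClip n x = a)) = true := by
            simp [← hveq, hav, hx]
          rw [hpred]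
          simp
          try omega
        · have hnat : a.toNat ≠ v.toNat := by omega
          have hget : (c0.set v.toNat (c0.getD v.toNat 0 + 1)).getD a.toNat 0
              = c0.getD a.toNat 0 := by
            simp [List.getD_eq_getElem?_getD, List.getElem?_set_ne (by omega : v.toNat ≠ a.toNat)]
          rw [hget]
          have hpred : (decide (0 < x ∧ pvClip n x = a)) = false := by
            simp [← hveq]
            intro _
            exact hav
          rw [hpred]
          simp
          try omega
      · rw [ihe, List.filter_cons, if_pos (by simpa using hx)]
        simp only [List.map_cons, List.sum_cons, ← hveq]
        ring
    · rw [if_neg hx]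
      obtain ⟨ihl, ihg, ihe⟩ := ih c0 e0 hlen
      refine ⟨ihl, ?_, ?_⟩
      · intro a ha han
        rw [ihg a ha han, List.countP_cons]
        have hpred : (decide (0 < x ∧ pvClip n x = a)) = false := by
          simp
          intro h
          omega
        rw [hpred]
        simp
      · rw [ihe, List.filter_cons, if_neg (by simpa using hx)]

-- the bucket array built by pvCountB: entry v counts the positive x ∈ S with clip x = v
lemma pvCountB_cnt (S : List Int) (n : Nat) (a : Int) (ha : 1 ≤ a) (han : a ≤ (n : Int)) :
    (PySem.List.pyGetD (pvCountB S n).1 a 0).toNat =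
      S.countP (fun x => decide (0 < x ∧ pvClip n x = a)) := by
  obtain ⟨hl, hg, _⟩ := pvCountB_fold n S (List.replicate (n + 1) 0) 0 (by simp)
  have hac : a = ((a.toNat : Nat) : Int) := by omega
  simp only [pvCountB]
  conv_lhs => rw [hac, PySem.List.pyGetD_natCast]
  rw [hg a ha han]
  have hrep : (List.replicate (n + 1) (0 : Int)).getD a.toNat 0 = 0 := by
    simp [List.getD_eq_getElem?_getD, List.getElem?_replicate]
    split_ifs <;> rfl
  rw [hrep]
  simp

lemma pvCountB_excess (S : List Int) (n : Nat) :
    (pvCountB S n).2 = ((S.filter (fun x => decide (0 < x))).map (fun x => x - pvClip n x)).sum := by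
  obtain ⟨_, _, he⟩ := pvCountB_fold n S (List.replicate (n + 1) 0) 0 (by simp)
  simp only [pvCountB]
  rw [he]
  simp

-- the clipped scan differs from the true scan by exactly the total excess
lemma pvAscan_clip (n : Nat) : ∀ (P : List Int) (day : Nat) (out : Int),
    P.Pairwise (· ≥ ·) → (∀ x ∈ P, 0 < x) → day + P.length ≤ n →
    pvAscan P out (day : Int) =
      pvAscan (P.map (pvClip n)) out (day : Int) + (P.map (fun x => x - pvClip n x)).sum := by
  intro P
  induction P with
  | nil => intro day out _ _ _; simp [pvAscan]
  | cons x xs ih =>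
    intro day out hP hpos hn
    have hd : (day : Int) < (n : Int) := by
      have : day + (x :: xs).length ≤ n := hn
      simp at this
      push_cast
      omega
    have hx : 0 < x := hpos x List.mem_cons_self
    have hiff : x > (day : Int) ↔ pvClip n x > (day : Int) := by
      unfold pvClip
      split_ifs with h <;> constructor <;> intro <;> omega
    simp only [List.map_cons, pvAscan, List.sum_cons]
    by_cases hcond : x > (day : Int)
    · rw [if_pos hcond, if_pos (hiff.mp hcond)]
      have hcast : (day : Int) + 1 = ((day + 1 : Nat) : Int) := by push_cast; ring
      rw [hcast, ih (day + 1) (out + x - (day : Int))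
        (List.Pairwise.of_cons hP) (fun y hy => hpos y (List.mem_cons_of_mem _ hy))
        (by simp at hn ⊢; omega)]
      have hsplit : out + x - (day : Int)
          = (out + pvClip n x - (day : Int)) + (x - pvClip n x) := by ring
      rw [hsplit, pvAscan_shift]
      ring
    · rw [if_neg hcond, if_neg (fun hc => hcond (hiff.mpr hc))]
      have hsum : (xs.map (fun y => y - pvClip n y)).sum = 0 := by
        apply List.sum_eq_zero
        intro z hz
        obtain ⟨y, hy, rfl⟩ := List.mem_map.mp hz
        have h1 : y ≤ x := List.rel_of_pairwise_cons hP hy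
        have h2 : 0 < y := hpos y (List.mem_cons_of_mem _ hy)
        unfold pvClip
        rw [if_pos (by omega)]
        ring
      have hclip : pvClip n x = x := by unfold pvClip; rw [if_pos (by omega)]
      rw [hsum, hclip]
      ring

lemma pvCount_map_filter (f : Int → Int) (p : Int → Bool) (a : Int) : ∀ (S : List Int),
    ((S.filter p).map f).count a = S.countP (fun x => p x && decide (f x = a)) := by
  intro S
  induction S with
  | nil => simp
  | cons x xs ih =>
    rw [List.filter_cons, List.countP_cons]
    by_cases hp : p x = true
    · rw [if_pos hp, List.map_cons, List.count_cons, ih, hp]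
      by_cases hf : f x = a
      · rw [if_pos (by simp [hf]), hf]
        simp
      · rw [if_neg (by simp; exact fun h => hf h)]
        simp [hf]
    · rw [if_neg hp, ih]
      have hpf : (p x && decide (f x = a)) = false := by
        cases hpx : p x
        · simp
        · exact absurd hpx hp
      rw [hpf]
      simp

-- the generated list IS the clipped descending positive prefix
lemma pvGenL_eq_map (S : List Int) (P : List Int) (hP : P.Pairwise (· ≥ ·))
    (hpos : ∀ x ∈ P, 0 < x)
    (hperm : P.Perm (S.filter (fun x => decide (0 < x)))) :
    pvGenL (pvCountB S S.length).1 S.length = P.map (pvClip S.length) := by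
  have hmono : ∀ a b : Int, a ≥ b → pvClip S.length a ≥ pvClip S.length b := by
    intro a b h
    unfold pvClip
    split_ifs <;> omega
  refine List.Perm.eq_of_pairwise (fun a b _ _ h1 h2 => le_antisymm h2 h1)
    (pvGenL_sorted _ _) (hP.map _ hmono) ?_
  apply List.perm_iff_count.mpr
  intro a
  have hcm : (P.map (pvClip S.length)).count a
      = S.countP (fun x => decide (0 < x) && decide (pvClip S.length x = a)) := by
    rw [(hperm.map (pvClip S.length)).count_eq, pvCount_map_filter]
  rw [pvGenL_count, hcm]
  by_cases hr : 1 ≤ a ∧ a ≤ (S.length : Int)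
  · rw [if_pos hr, pvCountB_cnt S S.length a hr.1 hr.2]
    congr 1
    funext x
    simp
  · rw [if_neg hr]
    symm
    rw [List.countP_eq_zero]
    intro x hx
    simp only [Bool.and_eq_true, decide_eq_true_eq]
    rintro ⟨h0, hclip⟩
    have hlen : 1 ≤ S.length := List.length_pos_of_mem hx
    revert hclip
    unfold pvClip
    split_ifs <;> intro hclip <;> omega

-- ===== VERDICT (by name: the statement is the Claim_ definition above) =====
theorem snow_spec : Claim_equal_snow := by
  intro S _ _
  unfold Spec_snow snow snow_alt
  have hg := pvMergeSort_good ((((S.length : Int) - 1) - 0).toNat) S 0 ((S.length : Int) - 1)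
    le_rfl le_rfl (by omega) (by omega)
  have harith : (((S.length : Int) - 1) - 0 + 1).toNat = S.length := by omega
  rw [harith] at hg
  simp only [Int.toNat_zero, List.drop_zero, List.take_length] at hg
  obtain ⟨P, J, heq, hPp, hpos, hJk, hperm, _⟩ := hg
  have hPlen : P.length ≤ S.length := by
    have h1 := hperm.length_eq
    have h2 := List.length_filter_le (fun x => decide (0 < x)) S
    omega
  -- A side
  rw [heq, pvSnowLoopA_eq (P ++ J).length (P ++ J) 0 0 (by omega)]
  simp only [List.drop_zero, Nat.cast_zero]
  rw [pvAscan_junk P J 0 0 hJk le_rfl]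
  -- B side
  rw [pvOuterB_eq, pvGenL_eq_map S P hPp hpos hperm, pvCountB_excess]
  have hsum : ((S.filter (fun x => decide (0 < x))).map (fun x => x - pvClip S.length x)).sum
      = (P.map (fun x => x - pvClip S.length x)).sum :=
    ((hperm.map _).sum_eq).symm
  rw [hsum]
  have hclip := pvAscan_clip S.length P 0 0 hPp hpos (by omega)
  simp only [Nat.cast_zero] at hclip
  exact hclip
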